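-- pv_equiv track=rewrite | github.com/ezraidenn/DEBUGBI0 | webapp/mobper_excel.py | agrupar_dias_consecutivos
-- ===== SOURCE A (Python) =====
-- from typing import List, Dict, Tuple
--
-- def agrupar_dias_consecutivos(dias: List[int]) -> str:
--     """
--     Agrupa dias consecutivos para mostrar de forma compacta.
--     Ejemplo: [1,2,3,5,7,8,9] -> "1-3, 5, 7-9"
--     """
--     if not dias:
--         return ""
--
--     dias = sorted(set(dias))
--     grupos = []
--     inicio = dias[0]
--     fin = dias[0]
--
--     for dia in dias[1:]:
--         if dia == fin + 1:
--             fin = dia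
--         else:
--             if inicio == fin:
--                 grupos.append(str(inicio))
--             else:
--                 grupos.append(f"{inicio}-{fin}" if fin - inicio > 1 else f"{inicio},{fin}")
--             inicio = fin = dia
--
--     # Agregar ultimo grupo
--     if inicio == fin:
--         grupos.append(str(inicio))
--     else:
--         grupos.append(f"{inicio}-{fin}" if fin - inicio > 1 else f"{inicio},{fin}")
--
--     return ", ".join(grupos)
-- ===== SOURCE B (Python) =====
-- def agrupar_dias_consecutivos(dias):
--     """Boundary detection via set membership: d starts a run iff d-1 not in the
--     set, ends a run iff d+1 not in the set; zip sorted starts with sorted ends."""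
--     s = set(dias)
--     inicios = sorted(d for d in s if d - 1 not in s)
--     fines = sorted(d for d in s if d + 1 not in s)
--     partes = []
--     for a, b in zip(inicios, fines):
--         if a == b:
--             partes.append(str(a))
--         elif b - a > 1:
--             partes.append(f"{a}-{b}")
--         else:
--             partes.append(f"{a},{b}")
--     return ", ".join(partes)
-- ===== Notes on version B (the rewrite author's own statement) =====
-- stated objective: alternative
-- what changed: B never scans runs sequentially: it detects run boundaries by set membership (d is a run start iff d-1 is not in the set, a run end iff d+1 is not in the set), sorts the two boundary lists and zips them into (start,end) pairs, replacing A's single stateful pass with inicio/fin tracking and flushes.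
import Mathlib
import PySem

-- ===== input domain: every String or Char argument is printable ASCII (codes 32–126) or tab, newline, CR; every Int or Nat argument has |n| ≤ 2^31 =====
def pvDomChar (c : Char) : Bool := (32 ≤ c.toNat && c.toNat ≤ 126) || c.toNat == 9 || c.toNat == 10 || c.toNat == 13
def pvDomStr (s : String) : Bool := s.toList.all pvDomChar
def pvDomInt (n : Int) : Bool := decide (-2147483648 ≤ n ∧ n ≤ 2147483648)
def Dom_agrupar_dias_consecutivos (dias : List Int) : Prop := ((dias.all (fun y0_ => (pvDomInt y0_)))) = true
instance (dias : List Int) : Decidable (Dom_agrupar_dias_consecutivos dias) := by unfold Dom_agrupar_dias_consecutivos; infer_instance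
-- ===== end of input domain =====

-- B replaces A's stateful single pass by boundary detection: run starts are the set
-- elements d with d-1 absent, run ends those with d+1 absent; sorted starts zipped
-- with sorted ends give the runs (alternative decomposition, same cost).


-- ===== PORT A =====
-- A's loop body: state (grupos, inicio, fin); the format expression is inlined as in A
def pvStepA (s : List String × Int × Int) (dia : Int) : List String × Int × Int :=
  if dia = s.2.2 + 1 then (s.1, s.2.1, dia)
  else (s.1 ++ [if s.2.1 = s.2.2 then PySem.Int.toStr s.2.1
                else if s.2.2 - s.2.1 > 1 then PySem.Int.toStr s.2.1 ++ "-" ++ PySem.Int.toStr s.2.2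
                else PySem.Int.toStr s.2.1 ++ "," ++ PySem.Int.toStr s.2.2],
        dia, dia)

def agrupar_dias_consecutivos (dias : List Int) : String :=
  if dias = [] then ""
  else
    match PySem.List.sorted (PySem.Set.ofList dias) (fun x => x) false with
    | [] => ""          -- unreachable: sorted(set(dias)) is nonempty when dias is
    | d0 :: rest =>
      let st := rest.foldl pvStepA ([], d0, d0)
      -- flush the last group, then join
      PySem.Str.join ", "
        (st.1 ++ [if st.2.1 = st.2.2 then PySem.Int.toStr st.2.1
                  else if st.2.2 - st.2.1 > 1 then PySem.Int.toStr st.2.1 ++ "-" ++ PySem.Int.toStr st.2.2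
                  else PySem.Int.toStr st.2.1 ++ "," ++ PySem.Int.toStr st.2.2])

-- ===== PORT B =====
-- run starts (d-1 absent from the set) and run ends (d+1 absent), each sorted, zipped
def agrupar_dias_consecutivos_alt (dias : List Int) : String :=
  let s := PySem.Set.ofList dias
  let inicios := PySem.List.sorted (s.filter (fun d => !(PySem.Set.contains s (d - 1)))) (fun x => x) false
  let fines := PySem.List.sorted (s.filter (fun d => !(PySem.Set.contains s (d + 1)))) (fun x => x) false
  let partes := (inicios.zip fines).map (fun p =>
    if p.1 = p.2 then PySem.Int.toStr p.1
    else if p.2 - p.1 > 1 then PySem.Int.toStr p.1 ++ "-" ++ PySem.Int.toStr p.2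
    else PySem.Int.toStr p.1 ++ "," ++ PySem.Int.toStr p.2)
  PySem.Str.join ", " partes

-- ===== PRECONDITION & SPEC =====
def Spec_agrupar_dias_consecutivos (dias : List Int) (out : String) : Prop := out = agrupar_dias_consecutivos_alt dias
instance (dias : List Int) (out : String) : Decidable (Spec_agrupar_dias_consecutivos dias out) := by unfold Spec_agrupar_dias_consecutivos; infer_instance

-- ===== CLAIM (what is proved, stated in full; the proofs are below) =====
def Claim_equal_agrupar_dias_consecutivos : Prop := ∀ (dias : List Int), Dom_agrupar_dias_consecutivos dias → Spec_agrupar_dias_consecutivos dias (agrupar_dias_consecutivos dias)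

-- ===== LEMMAS AND PROOFS =====

-- the three-way format both ports inline
def pvFmt (a b : Int) : String :=
  if a = b then PySem.Int.toStr a
  else if b - a > 1 then PySem.Int.toStr a ++ "-" ++ PySem.Int.toStr b
  else PySem.Int.toStr a ++ "," ++ PySem.Int.toStr b

-- reference run-splitting of a strictly increasing list, as A computes it
def pvRunsOf (a b : Int) : List Int → List (Int × Int)
  | [] => [(a, b)]
  | d :: ds => if d = b + 1 then pvRunsOf a d ds else (a, b) :: pvRunsOf d d ds

def pvRunsList : List Int → List (Int × Int)
  | [] => []
  | d :: ds => pvRunsOf d d ds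

-- end of the first run / runs after the first run (for decomposing pvRunsOf)
def pvEndOf : Int → List Int → Int
  | b, [] => b
  | b, d :: ds => if d = b + 1 then pvEndOf d ds else b

def pvAfter : Int → List Int → List (Int × Int)
  | _, [] => []
  | b, d :: ds => if d = b + 1 then pvAfter d ds else (d, pvEndOf d ds) :: pvAfter d ds

theorem pvRunsOf_decomp (ds : List Int) : ∀ a b, pvRunsOf a b ds = (a, pvEndOf b ds) :: pvAfter b ds := by
  induction ds with
  | nil => intro a b; simp [pvRunsOf, pvEndOf, pvAfter]
  | cons d ds ih =>
    intro a b
    by_cases h : d = b + 1 <;> simp [pvRunsOf, pvEndOf, pvAfter, h, ih]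

-- A's loop, after flushing the final group, yields grupos ++ the formatted runs
theorem pvA_loop (rest : List Int) : ∀ (g : List String) (a b : Int),
    (rest.foldl pvStepA (g, a, b)).1
      ++ [pvFmt (rest.foldl pvStepA (g, a, b)).2.1 (rest.foldl pvStepA (g, a, b)).2.2]
    = g ++ (pvRunsOf a b rest).map (fun p => pvFmt p.1 p.2) := by
  induction rest with
  | nil => intro g a b; simp [pvRunsOf]
  | cons d ds ih =>
    intro g a b
    by_cases h : d = b + 1
    · simp only [List.foldl_cons, pvStepA, h, pvRunsOf, if_true]
      exact ih g a b.succ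
    · simp only [List.foldl_cons, pvStepA, if_neg h, pvRunsOf]
      rw [ih]
      simp [pvFmt, List.append_assoc]

-- B's zip of boundary filters equals the reference runs, on a strictly increasing list
theorem pvZip_runs (L : List Int) (hL : L.Pairwise (· < ·)) :
    (L.filter (fun d => !(decide ((d - 1) ∈ L)))).zip (L.filter (fun d => !(decide ((d + 1) ∈ L))))
      = pvRunsList L := by
  induction L with
  | nil => simp [pvRunsList]
  | cons d rest ih =>
    have hd_lt : ∀ x ∈ rest, d < x := fun x hx => (List.pairwise_cons.mp hL).1 x hx
    have hrest : rest.Pairwise (· < ·) := (List.pairwise_cons.mp hL).2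
    -- d is always a start
    have hstart_d : (!(decide ((d - 1) ∈ (d :: rest)))) = true := by
      simp only [Bool.not_eq_true', decide_eq_false_iff_not, List.mem_cons]
      rintro (h | h); · omega
      · exact absurd (hd_lt _ h) (by omega)
    cases rest with
    | nil => simp [pvRunsList, pvRunsOf]
    | cons e ds' =>
      have he : d < e := hd_lt e List.mem_cons_self
      have hds'_lt : ∀ x ∈ ds', e < x := fun x hx => (List.pairwise_cons.mp hrest).1 x hx
      -- the ends filter is unchanged by dropping the head d
      have hend_congr : List.filter (fun x => !(decide ((x + 1) ∈ (d :: e :: ds')))) (e :: ds')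
          = List.filter (fun x => !(decide ((x + 1) ∈ (e :: ds')))) (e :: ds') := by
        apply List.filter_congr
        intro x hx
        have hx_gt : d < x := hd_lt x hx
        simp only [List.mem_cons]
        have : ¬ (x + 1 = d) := by omega
        simp [this]
      by_cases hcons : e = d + 1
      · -- run continues: d is a start, e = d+1 is not; ends are the tail's ends
        subst hcons
        have hs_e : (!(decide ((d + 1 - 1) ∈ (d :: (d+1) :: ds')))) = false := by simp
        have hstart_congr : List.filter (fun x => !(decide ((x - 1) ∈ (d :: (d+1) :: ds')))) ds'
            = List.filter (fun x => !(decide ((x - 1) ∈ ((d+1) :: ds')))) ds' := by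
          apply List.filter_congr
          intro x hx
          have hx_gt : d + 1 < x := hds'_lt x hx
          simp only [List.mem_cons]
          have : ¬ (x - 1 = d) := by omega
          simp [this]
        have hs_e_tail : (!(decide ((d + 1 - 1) ∈ ((d+1) :: ds')))) = true := by
          simp only [Bool.not_eq_true', decide_eq_false_iff_not, List.mem_cons]
          rintro (h | h); · omega
          · exact absurd (hds'_lt _ h) (by omega)
        have hq_d : (!(decide ((d + 1) ∈ (d :: (d+1) :: ds')))) = false := by simp
        have g1 : List.filter (fun x => !(decide ((x - 1) ∈ (d :: (d+1) :: ds')))) (d :: (d+1) :: ds')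
            = d :: List.filter (fun x => !(decide ((x - 1) ∈ ((d+1) :: ds')))) ds' := by
          simp only [List.filter_cons, hstart_d, hs_e, if_true, Bool.false_eq_true, if_false]
          rw [hstart_congr]
        have g2 : List.filter (fun x => !(decide ((x + 1) ∈ (d :: (d+1) :: ds')))) (d :: (d+1) :: ds')
            = List.filter (fun x => !(decide ((x + 1) ∈ ((d+1) :: ds')))) ((d+1) :: ds') := by
          rw [List.filter_cons, hq_d]
          simp only [Bool.false_eq_true, if_false]
          exact hend_congr
        have g4 : List.filter (fun x => !(decide ((x - 1) ∈ ((d+1) :: ds')))) ((d+1) :: ds')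
            = (d+1) :: List.filter (fun x => !(decide ((x - 1) ∈ ((d+1) :: ds')))) ds' := by
          rw [List.filter_cons, hs_e_tail]; simp
        have hIH := ih hrest
        rw [pvRunsList, pvRunsOf_decomp, g4] at hIH
        rcases hET : List.filter (fun x => !(decide ((x + 1) ∈ ((d+1) :: ds')))) ((d+1) :: ds') with _ | ⟨h1, t1⟩
        · rw [hET] at hIH; simp at hIH
        · rw [hET] at hIH
          rw [List.zip_cons_cons] at hIH
          injection hIH with hh htl
          injection hh with hh1 hh2
          rw [g1, g2, hET, List.zip_cons_cons]
          rw [pvRunsList, pvRunsOf]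
          rw [if_pos rfl]
          rw [pvRunsOf_decomp]
          rw [htl, hh2]
      · -- a new run opens at e: d is both a start and an end
        have hnd : d + 1 < e := by omega
        have hstart_congr : List.filter (fun x => !(decide ((x - 1) ∈ (d :: e :: ds')))) (e :: ds')
            = List.filter (fun x => !(decide ((x - 1) ∈ (e :: ds')))) (e :: ds') := by
          apply List.filter_congr
          intro x hx
          have hx_ge : e ≤ x := by
            rcases List.mem_cons.mp hx with h | h
            · omega
            · exact le_of_lt (hds'_lt x h)
          simp only [List.mem_cons]
          have : ¬ (x - 1 = d) := by omega
          simp [this]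
        have hend_d : (!(decide ((d + 1) ∈ (d :: e :: ds')))) = true := by
          simp only [Bool.not_eq_true', decide_eq_false_iff_not, List.mem_cons]
          rintro (h | h | h)
          · omega
          · omega
          · exact absurd (hds'_lt _ h) (by omega)
        have g1 : List.filter (fun x => !(decide ((x - 1) ∈ (d :: e :: ds')))) (d :: e :: ds')
            = d :: List.filter (fun x => !(decide ((x - 1) ∈ (e :: ds')))) (e :: ds') := by
          rw [List.filter_cons, hstart_d, if_pos rfl, hstart_congr]
        have g2 : List.filter (fun x => !(decide ((x + 1) ∈ (d :: e :: ds')))) (d :: e :: ds')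
            = d :: List.filter (fun x => !(decide ((x + 1) ∈ (e :: ds')))) (e :: ds') := by
          rw [List.filter_cons, hend_d, if_pos rfl, hend_congr]
        rw [g1, g2, List.zip_cons_cons, ih hrest]
        rw [pvRunsList, pvRunsList, pvRunsOf]
        simp [hcons]

-- sorting a filtered set is filtering the sorted set
theorem pvSortedFilter (dias : List Int) (p : Int → Bool) :
    PySem.List.sorted ((PySem.Set.ofList dias).filter p) (fun x => x) false
      = (PySem.List.sorted (PySem.Set.ofList dias) (fun x => x) false).filter p := by
  apply PySem.List.sorted_eq_of_perm_of_pairwise_lt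
  · exact (PySem.List.sorted_perm (PySem.Set.ofList dias) (fun x => x) false).filter p
  · exact (PySem.List.sorted_ofList_pairwise_lt (xs := dias)).filter p

-- membership tests against the set and against its sorted list agree
theorem pvContains_eq (dias : List Int) (y : Int) :
    PySem.Set.contains (PySem.Set.ofList dias) y
      = decide (y ∈ PySem.List.sorted (PySem.Set.ofList dias) (fun x => x) false) := by
  cases h : PySem.Set.contains (PySem.Set.ofList dias) y with
  | false =>
    have hn : y ∉ PySem.Set.ofList dias :=
      fun hm => Bool.false_ne_true (h ▸ (PySem.Set.contains_iff _ _).mpr hm)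
    simp [PySem.List.mem_sorted, hn]
  | true =>
    have hm := (PySem.Set.contains_iff _ _).mp h
    simp [PySem.List.mem_sorted, hm]

theorem pv_sorted_set_ne_nil (dias : List Int) (h : dias ≠ []) :
    PySem.List.sorted (PySem.Set.ofList dias) (fun x => x) false ≠ [] := by
  intro hs
  rw [PySem.List.sorted_eq_nil_iff] at hs
  cases dias with
  | nil => exact h rfl
  | cons x xs =>
    have hx : x ∈ PySem.Set.ofList (x :: xs) := by
      rw [PySem.Set.mem_ofList]; exact List.mem_cons_self
    rw [hs] at hx
    exact absurd hx (List.not_mem_nil)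

-- ===== VERDICT (by name: the statement is the Claim_ definition above) =====
theorem agrupar_dias_consecutivos_spec : Claim_equal_agrupar_dias_consecutivos := by
  intro dias _
  unfold Spec_agrupar_dias_consecutivos agrupar_dias_consecutivos agrupar_dias_consecutivos_alt
  simp only
  rw [pvSortedFilter, pvSortedFilter]
  have hfc1 : (PySem.List.sorted (PySem.Set.ofList dias) (fun x => x) false).filter
        (fun d => !(PySem.Set.contains (PySem.Set.ofList dias) (d - 1)))
      = (PySem.List.sorted (PySem.Set.ofList dias) (fun x => x) false).filter
        (fun d => !(decide ((d - 1) ∈ PySem.List.sorted (PySem.Set.ofList dias) (fun x => x) false))) := by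
    apply List.filter_congr; intro x _; rw [pvContains_eq]
  have hfc2 : (PySem.List.sorted (PySem.Set.ofList dias) (fun x => x) false).filter
        (fun d => !(PySem.Set.contains (PySem.Set.ofList dias) (d + 1)))
      = (PySem.List.sorted (PySem.Set.ofList dias) (fun x => x) false).filter
        (fun d => !(decide ((d + 1) ∈ PySem.List.sorted (PySem.Set.ofList dias) (fun x => x) false))) := by
    apply List.filter_congr; intro x _; rw [pvContains_eq]
  rw [hfc1, hfc2, pvZip_runs _ (PySem.List.sorted_ofList_pairwise_lt (xs := dias))]
  by_cases hd : dias = []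
  · subst hd
    simp [PySem.Set.ofList, PySem.List.sorted, pvRunsList, PySem.Str.join]
  · simp only [if_neg hd]
    cases hs : PySem.List.sorted (PySem.Set.ofList dias) (fun x => x) false with
    | nil => exact absurd hs (pv_sorted_set_ne_nil dias hd)
    | cons d0 rest =>
      have hA := pvA_loop rest [] d0 d0
      simp only [List.nil_append] at hA
      rw [pvRunsList]
      simp only [pvFmt] at hA
      exact congrArg (PySem.Str.join ", ") hA
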